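-- pv_equiv track=rewrite | github.com/DaKashi-bmp/Goldsource-Model-Helper | __init__.py | _swap_by_suffix
-- ===== SOURCE A (Python) =====
-- limb_suffix_map = {
--     "L Leg": "L Thigh",
--     "L Leg1": "L Calf",
--     "R Leg": "R Thigh",
--     "R Leg1": "R Calf",
--     "L Arm": "L Clavicle",
--     "L Arm1": "L UpperArm",
--     "L Arm2": "L Forearm",
--     "R Arm": "R Clavicle",
--     "R Arm1": "R UpperArm",
--     "R Arm2": "R Forearm",
-- }
--
-- reverse_suffix_map = {v: k for k, v in limb_suffix_map.items()}
--
-- def _swap_by_suffix(name: str) -> str: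
--     for suf, mapped in limb_suffix_map.items():
--         needle = " " + suf
--         if name.endswith(needle):
--             prefix = name[: -len(needle)]
--             return f"{prefix} {mapped}"
--     for suf, mapped in reverse_suffix_map.items():
--         needle = " " + suf
--         if name.endswith(needle):
--             prefix = name[: -len(needle)]
--             return f"{prefix} {mapped}"
--     return name
-- ===== SOURCE B (Python) =====
-- # One symmetric lookup table; parse the two-token tail with rpartition and a
-- # single dict lookup instead of scanning 20 suffixes with endswith.
-- _SWAP = {
--     "L Leg": "L Thigh", "L Leg1": "L Calf", "R Leg": "R Thigh", "R Leg1": "R Calf",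
--     "L Arm": "L Clavicle", "L Arm1": "L UpperArm", "L Arm2": "L Forearm",
--     "R Arm": "R Clavicle", "R Arm1": "R UpperArm", "R Arm2": "R Forearm",
--     "L Thigh": "L Leg", "L Calf": "L Leg1", "R Thigh": "R Leg", "R Calf": "R Leg1",
--     "L Clavicle": "L Arm", "L UpperArm": "L Arm1", "L Forearm": "L Arm2",
--     "R Clavicle": "R Arm", "R UpperArm": "R Arm1", "R Forearm": "R Arm2",
-- }
--
-- def _swap_by_suffix(name: str) -> str:
--     head, sep, last = name.rpartition(' ')
--     if sep:
--         head2, sep2, mid = head.rpartition(' ')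
--         if sep2:
--             mapped = _SWAP.get(mid + ' ' + last)
--             if mapped is not None:
--                 return head2 + ' ' + mapped
--     return name
-- ===== Notes on version B (the rewrite author's own statement) =====
-- stated objective: idiomatic
-- what changed: Instead of scanning all 20 suffixes with endswith in two loops, B splits off the last two space-separated tokens with rpartition and does one lookup of that two-token tail in a single symmetric dict.
import Mathlib
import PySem

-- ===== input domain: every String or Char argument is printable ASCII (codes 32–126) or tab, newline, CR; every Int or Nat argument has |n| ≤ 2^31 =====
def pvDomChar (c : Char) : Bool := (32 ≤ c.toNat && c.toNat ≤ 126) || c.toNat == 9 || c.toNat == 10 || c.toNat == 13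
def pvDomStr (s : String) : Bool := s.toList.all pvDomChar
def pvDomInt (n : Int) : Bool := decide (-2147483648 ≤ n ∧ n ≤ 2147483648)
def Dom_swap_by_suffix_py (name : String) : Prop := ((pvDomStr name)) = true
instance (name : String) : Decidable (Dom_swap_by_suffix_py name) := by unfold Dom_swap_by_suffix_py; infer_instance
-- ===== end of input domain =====

-- B replaces A's two endswith scans over 20 suffixes by one rpartition-based parse of the
-- last two space-separated tokens plus a single lookup in one symmetric table (idiomatic).

-- ===== PORT A =====
-- limb_suffix_map as an association list in insertion order (dict[K,V] -> List (K x V))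
def limbPairs : List (List Char × List Char) :=
  [("L Leg".toList, "L Thigh".toList),
   ("L Leg1".toList, "L Calf".toList),
   ("R Leg".toList, "R Thigh".toList),
   ("R Leg1".toList, "R Calf".toList),
   ("L Arm".toList, "L Clavicle".toList),
   ("L Arm1".toList, "L UpperArm".toList),
   ("L Arm2".toList, "L Forearm".toList),
   ("R Arm".toList, "R Clavicle".toList),
   ("R Arm1".toList, "R UpperArm".toList),
   ("R Arm2".toList, "R Forearm".toList)]

-- reverse_suffix_map = {v: k for k, v in limb_suffix_map.items()}: the keys of the
-- comprehension (A's values) are distinct, so the dict built is exactly the swapped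
-- association list, in order.
def revPairs : List (List Char × List Char) := limbPairs.map (fun kv => (kv.2, kv.1))

-- one 'for suf, mapped in <pairs>.items(): ...' loop of A, with its early return
def scanA (cs : List Char) : List (List Char × List Char) → Option (List Char)
  | [] => none
  | (suf, mapped) :: rest =>
      let needle := ' ' :: suf
      if PySem.Chars.endswith cs needle then
        some (PySem.List.slice cs none (some (-(needle.length : Int))) ++ ' ' :: mapped)
      else scanA cs rest

def swap_by_suffix_py (name : String) : String :=
  let cs := name.toList
  match scanA cs limbPairs with
  | some r => String.ofList r
  | none =>
      match scanA cs revPairs with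
      | some r => String.ofList r
      | none => name

-- ===== PORT B =====
-- the single symmetric dict _SWAP of Source B (association list; keys distinct,
-- dict .get = first-match lookup = List.lookup)
def swapPairs : List (List Char × List Char) :=
  [("L Leg".toList, "L Thigh".toList), ("L Leg1".toList, "L Calf".toList),
   ("R Leg".toList, "R Thigh".toList), ("R Leg1".toList, "R Calf".toList),
   ("L Arm".toList, "L Clavicle".toList), ("L Arm1".toList, "L UpperArm".toList),
   ("L Arm2".toList, "L Forearm".toList), ("R Arm".toList, "R Clavicle".toList),
   ("R Arm1".toList, "R UpperArm".toList), ("R Arm2".toList, "R Forearm".toList),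
   ("L Thigh".toList, "L Leg".toList), ("L Calf".toList, "L Leg1".toList),
   ("R Thigh".toList, "R Leg".toList), ("R Calf".toList, "R Leg1".toList),
   ("L Clavicle".toList, "L Arm".toList), ("L UpperArm".toList, "L Arm1".toList),
   ("L Forearm".toList, "L Arm2".toList), ("R Clavicle".toList, "R Arm".toList),
   ("R UpperArm".toList, "R Arm1".toList), ("R Forearm".toList, "R Arm2".toList)]

-- hand port of str.rpartition(' ') (PySem has no rpartition): splits at the LAST space;
-- 'none' encodes Python's ('', '', s) no-separator result. Exact on all inputs.
def rpartSp (cs : List Char) : Option (List Char × List Char) :=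
  let tl := (cs.reverse.takeWhile (fun c => decide (c ≠ ' '))).reverse
  if tl.length = cs.length then none
  else some (cs.take (cs.length - tl.length - 1), tl)

def swap_by_suffix_py_alt (name : String) : String :=
  match rpartSp name.toList with
  | none => name
  | some (head, last) =>
      match rpartSp head with
      | none => name
      | some (head2, mid) =>
          match swapPairs.lookup (mid ++ ' ' :: last) with
          | none => name
          | some mapped => String.ofList (head2 ++ ' ' :: mapped)


-- ===== PRECONDITION & SPEC =====
def Spec_swap_by_suffix_py (name : String) (out : String) : Prop := out = swap_by_suffix_py_alt name
instance (name : String) (out : String) : Decidable (Spec_swap_by_suffix_py name out) := by unfold Spec_swap_by_suffix_py; infer_instance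

-- ===== CLAIM (what is proved, stated in full; the proofs are below) =====
def Claim_equal_swap_by_suffix_py : Prop := ∀ (name : String), Dom_swap_by_suffix_py name → Spec_swap_by_suffix_py name (swap_by_suffix_py name)

-- ===== LEMMAS AND PROOFS =====
theorem pv_tw (l₁ l₂ : List Char) (a : Char) (hm : a ∉ l₁) :
    (l₁ ++ a :: l₂).takeWhile (fun c => decide (c ≠ a)) = l₁ := by
  induction l₁ with
  | nil => simp
  | cons hd tl ih =>
    rw [List.mem_cons, not_or] at hm
    have h1 : ¬ hd = a := fun h => hm.1 h.symm
    have h2 := ih hm.2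
    simp only [ne_eq, decide_not] at h2 ⊢
    simp [h1, h2]

theorem pv_tw_self (l : List Char) (a : Char) (hm : a ∉ l) :
    l.takeWhile (fun c => decide (c ≠ a)) = l := by
  rw [List.takeWhile_eq_self_iff]
  intro x hx
  simp
  exact fun h => hm (h ▸ hx)

theorem rpartSp_none (cs : List Char) (h : ' ' ∉ cs) : rpartSp cs = none := by
  unfold rpartSp
  have h' : ' ' ∉ cs.reverse := by simpa using h
  rw [pv_tw_self _ _ h']
  simp

theorem rpartSp_some (p t : List Char) (ht : ' ' ∉ t) :
    rpartSp (p ++ ' ' :: t) = some (p, t) := by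
  unfold rpartSp
  have h1 : (p ++ ' ' :: t).reverse = t.reverse ++ ' ' :: p.reverse := by simp
  have h2 : ' ' ∉ t.reverse := by simpa using ht
  rw [h1, pv_tw _ _ _ h2, List.reverse_reverse]
  have hlen : (p ++ ' ' :: t).length = p.length + t.length + 1 := by simp; omega
  rw [if_neg (by rw [hlen]; omega)]
  have h3 : (p ++ ' ' :: t).length - t.length - 1 = p.length := by rw [hlen]; omega
  rw [h3, List.take_left]

theorem split_unique {p₁ t₁ p₂ t₂ : List Char}
    (h : p₁ ++ ' ' :: t₁ = p₂ ++ ' ' :: t₂) (h1 : ' ' ∉ t₁) (h2 : ' ' ∉ t₂) :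
    p₁ = p₂ ∧ t₁ = t₂ := by
  have e := rpartSp_some p₁ t₁ h1
  rw [h, rpartSp_some p₂ t₂ h2] at e
  simpa using e.symm

theorem exists_last_split {cs : List Char} (h : ' ' ∈ cs) :
    ∃ p t, cs = p ++ ' ' :: t ∧ ' ' ∉ t := by
  induction cs using List.reverseRecOn with
  | nil => simp at h
  | append_singleton init a ih =>
    by_cases ha : a = ' '
    · exact ⟨init, [], by simp [ha], by simp⟩
    · have h' : ' ' ∈ init := by
        rcases List.mem_append.mp h with h | h
        · exact h
        · simp at h; exact absurd h.symm ha
      obtain ⟨p, t, hpt, ht⟩ := ih h'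
      refine ⟨p, t ++ [a], by simp [hpt], ?_⟩
      simp [ht]
      exact fun hh => ha hh.symm

theorem scanA_none (cs : List Char) (pairs : List (List Char × List Char))
    (h : ∀ k v, (k, v) ∈ pairs → PySem.Chars.endswith cs (' ' :: k) = false) :
    scanA cs pairs = none := by
  induction pairs with
  | nil => rfl
  | cons hd tl ih =>
    obtain ⟨k, v⟩ := hd
    have h1 := h k v (by simp)
    simp [scanA, h1]
    exact ih (fun k v hm => h k v (List.mem_cons_of_mem _ hm))

theorem scanA_append (cs : List Char) (L₁ L₂ : List (List Char × List Char)) :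
    scanA cs (L₁ ++ L₂) =
      (match scanA cs L₁ with | some r => some r | none => scanA cs L₂) := by
  induction L₁ with
  | nil => simp [scanA]
  | cons hd tl ih =>
    obtain ⟨k, v⟩ := hd
    by_cases h : PySem.Chars.endswith cs (' ' :: k) = true
    · simp [scanA, h]
    · simp only [Bool.not_eq_true] at h
      simp [scanA, h, ih]

theorem scanA_found (q key v : List Char) (pairs : List (List Char × List Char))
    (hv : pairs.lookup key = some v)
    (huniq : ∀ k m, (k, m) ∈ pairs →
      PySem.Chars.endswith (q ++ ' ' :: key) (' ' :: k) = true → k = key) :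
    scanA (q ++ ' ' :: key) pairs = some (q ++ ' ' :: v) := by
  induction pairs with
  | nil => simp [List.lookup] at hv
  | cons hd tl ih =>
    obtain ⟨k, m⟩ := hd
    by_cases hk : k = key
    · subst hk
      rw [List.lookup] at hv
      simp at hv
      subst hv
      have hend : PySem.Chars.endswith (q ++ ' ' :: k) (' ' :: k) = true :=
        (PySem.Chars.endswith_iff _ _).mpr ⟨q, rfl⟩
      simp [scanA, hend]
      have hs : PySem.List.slice (q ++ ' ' :: k) none (some (-((k.length + 1 : Nat) : Int))) =
          q := by
        rw [PySem.List.slice_to_neg_natCast _ _ (Nat.succ_pos _)]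
        have h3 : (q ++ ' ' :: k).length - (k.length + 1) = q.length := by simp
        rw [h3, List.take_left]
      have hcast : (-1 + -(k.length : Int)) = -((k.length + 1 : Nat) : Int) := by
        push_cast; ring
      rw [hcast, hs]
    · have hne : PySem.Chars.endswith (q ++ ' ' :: key) (' ' :: k) = false := by
        by_contra h'
        simp only [Bool.not_eq_false] at h'
        exact hk (huniq k m (by simp) h')
      rw [List.lookup] at hv
      have hbeq : (key == k) = false := beq_false_of_ne (Ne.symm hk)
      rw [hbeq] at hv
      simp at hv
      simp [scanA, hne]
      exact ih hv (fun k m hm he => huniq k m (List.mem_cons_of_mem _ hm) he)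

theorem match_key (q m t k : List Char) (hm : ' ' ∉ m) (ht : ' ' ∉ t)
    (hc : k.count ' ' = 1)
    (he : PySem.Chars.endswith (q ++ ' ' :: (m ++ ' ' :: t)) (' ' :: k) = true) :
    k = m ++ ' ' :: t := by
  obtain ⟨q', hq'⟩ := (PySem.Chars.endswith_iff _ _).mp he
  have hkmem : ' ' ∈ k := by rw [← List.count_pos_iff]; omega
  obtain ⟨b, c, hk, hcnot⟩ := exists_last_split hkmem
  have hbnot : ' ' ∉ b := by
    rw [hk, List.count_append, List.count_cons] at hc
    have hc0 : c.count ' ' = 0 := List.count_eq_zero.mpr hcnot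
    simp [hc0] at hc
    have hb0 : b.count ' ' = 0 := by omega
    exact List.count_eq_zero.mp hb0
  rw [hk] at hq'
  have heq : (q' ++ ' ' :: b) ++ ' ' :: c = (q ++ ' ' :: m) ++ ' ' :: t := by
    simpa [List.append_assoc] using hq'
  obtain ⟨h1, h2⟩ := split_unique heq hcnot ht
  obtain ⟨h3, h4⟩ := split_unique h1 hbnot hm
  rw [hk, h4, h2]

theorem hkeys : ∀ pr ∈ swapPairs, pr.1.count ' ' = 1 := by decide

theorem swapPairs_eq : swapPairs = limbPairs ++ revPairs := by decide

theorem A_combined (name : String) :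
    swap_by_suffix_py name =
      (match scanA name.toList swapPairs with
       | some r => String.ofList r
       | none => name) := by
  rw [swapPairs_eq, scanA_append]
  unfold swap_by_suffix_py
  rcases h1 : scanA name.toList limbPairs with _ | r
  · simp [h1]
  · simp [h1]

theorem lookup_isSome_of_mem (l : List (List Char × List Char)) (k v : List Char)
    (hm : (k, v) ∈ l) : (l.lookup k).isSome := by
  induction l with
  | nil => simp at hm
  | cons hd tl ih =>
    obtain ⟨k', v'⟩ := hd
    rcases List.mem_cons.mp hm with h | h
    · have hb : (k == k') = true := by cases h; simp
      rw [List.lookup, hb]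
      simp
    · rw [List.lookup]
      rcases hkk : (k == k') with _ | _
      · simpa using ih h
      · simp

theorem pv_main (name : String) : swap_by_suffix_py name = swap_by_suffix_py_alt name := by
  rw [A_combined]
  unfold swap_by_suffix_py_alt
  by_cases hsp : ' ' ∈ name.toList
  · obtain ⟨p, t, hcs, ht⟩ := exists_last_split hsp
    rw [hcs, rpartSp_some _ _ ht]
    dsimp only
    by_cases hsp2 : ' ' ∈ p
    · obtain ⟨q, m, hp, hm⟩ := exists_last_split hsp2
      rw [hp, rpartSp_some _ _ hm]
      dsimp only
      have hcs2 : (q ++ ' ' :: m) ++ ' ' :: t = q ++ ' ' :: (m ++ ' ' :: t) := by simp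
      rcases hv : swapPairs.lookup (m ++ ' ' :: t) with _ | v
      · rw [hcs2, scanA_none]
        intro k v hmem
        by_contra h'
        simp only [Bool.not_eq_false] at h'
        have hkey := match_key q m t k hm ht (hkeys _ hmem) h'
        rw [hkey] at hmem
        have hS := lookup_isSome_of_mem swapPairs _ v hmem
        rw [hv] at hS
        simp at hS
      · rw [hcs2, scanA_found q (m ++ ' ' :: t) v swapPairs hv
          (fun k mm hmem he => match_key q m t k hm ht (hkeys _ hmem) he)]
    · rw [rpartSp_none _ hsp2]
      dsimp only
      rw [scanA_none]
      intro k v hmem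
      by_contra h'
      simp only [Bool.not_eq_false] at h'
      have hsuf := (PySem.Chars.endswith_iff _ _).mp h'
      have hle := List.IsSuffix.count_le ' ' hsuf
      have h1 : (p ++ ' ' :: t).count ' ' = 1 := by
        rw [List.count_append, List.count_cons]
        simp [List.count_eq_zero.mpr hsp2, List.count_eq_zero.mpr ht]
      rw [h1, List.count_cons] at hle
      have hk1 := hkeys _ hmem
      simp [hk1] at hle
  · rw [rpartSp_none _ hsp]
    dsimp only
    rw [scanA_none]
    intro k v hmem
    by_contra h'
    simp only [Bool.not_eq_false] at h'
    have hsuf := (PySem.Chars.endswith_iff _ _).mp h'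
    exact hsp (hsuf.subset (by simp))

-- ===== VERDICT (by name: the statement is the Claim_ definition above) =====
theorem swap_by_suffix_py_spec : Claim_equal_swap_by_suffix_py := by
  intro name _
  exact pv_main name
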